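-- pv_equiv track=rewrite | github.com/luanarochamiron/projetocalculadora | operacao.py | exercicio16
-- ===== SOURCE A (Python) =====
-- def exercicio16(num1):
--     pares = ""
--     impar = ""
--     for i in range(1, num1 + 1):
--         if i % 2 == 0:
--             pares += f'\n{i}'
--         else:
--             impar += f'\n{i}'
--     resultado = (f'Números pares:{pares}\nNúmeros ímpares:{impar}')
--     return resultado
-- ===== SOURCE B (Python) =====
-- def exercicio16(num1):
--     pares = "".join(f'\n{i}' for i in range(2, num1 + 1, 2))
--     impar = "".join(f'\n{i}' for i in range(1, num1 + 1, 2))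
--     return f'Números pares:{pares}\nNúmeros ímpares:{impar}'
-- ===== Notes on version B (the rewrite author's own statement) =====
-- stated objective: idiomatic
-- what changed: B builds each list with its own stepped range (range(2,n+1,2) / range(1,n+1,2)) joined in one expression, partitioning by construction and removing A's branching loop with its i % 2 parity test and string accumulators.
import Mathlib
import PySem

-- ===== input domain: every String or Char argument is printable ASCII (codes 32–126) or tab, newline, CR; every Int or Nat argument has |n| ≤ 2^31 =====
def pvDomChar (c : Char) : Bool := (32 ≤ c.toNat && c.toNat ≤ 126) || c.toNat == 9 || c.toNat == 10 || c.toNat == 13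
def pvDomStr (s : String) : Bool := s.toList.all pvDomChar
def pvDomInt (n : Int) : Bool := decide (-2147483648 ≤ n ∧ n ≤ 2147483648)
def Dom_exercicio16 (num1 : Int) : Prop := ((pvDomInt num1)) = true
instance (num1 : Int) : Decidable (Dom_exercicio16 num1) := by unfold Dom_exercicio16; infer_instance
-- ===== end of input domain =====

-- B lists evens and odds with two stepped ranges joined in one expression instead of A's
-- branching parity-test loop (idiomatic decomposition; same O(n) cost, return value only).


-- ===== PORT A =====
def exercicio16 (num1 : Int) : String :=
  let st := (PySem.List.pyRange 1 (num1 + 1) 1).foldl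
    (fun (st : String × String) i =>
      if PySem.Int.mod i 2 == 0 then (st.1 ++ ("\n" ++ PySem.Int.toStr i), st.2)
      else (st.1, st.2 ++ ("\n" ++ PySem.Int.toStr i)))
    ("", "")
  "Números pares:" ++ st.1 ++ "\nNúmeros ímpares:" ++ st.2

-- ===== PORT B =====
def exercicio16_alt (num1 : Int) : String :=
  let pares := String.join ((PySem.List.pyRange 2 (num1 + 1) 2).map (fun i => "\n" ++ PySem.Int.toStr i))
  let impar := String.join ((PySem.List.pyRange 1 (num1 + 1) 2).map (fun i => "\n" ++ PySem.Int.toStr i))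
  "Números pares:" ++ pares ++ "\nNúmeros ímpares:" ++ impar

-- ===== PRECONDITION & SPEC =====
def Spec_exercicio16 (num1 : Int) (out : String) : Prop := out = exercicio16_alt num1
instance (num1 : Int) (out : String) : Decidable (Spec_exercicio16 num1 out) := by unfold Spec_exercicio16; infer_instance

-- ===== CLAIM (what is proved, stated in full; the proofs are below) =====
def Claim_equal_exercicio16 : Prop := ∀ (num1 : Int), Dom_exercicio16 num1 → Spec_exercicio16 num1 (exercicio16 num1)

-- ===== LEMMAS AND PROOFS =====

theorem join_append_singleton (l : List String) (s : String) :
    String.join (l ++ [s]) = String.join l ++ s := by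
  simp [String.join, List.foldl_append]

-- empty positive-step range when the bounds are degenerate
theorem pyRange_pos_eq_nil (a b s : Int) (hs : 0 < s) (h : b ≤ a) :
    PySem.List.pyRange a b s = [] := by
  rw [PySem.List.pyRange_of_pos _ _ hs, if_neg (by omega)]
  simp

-- extending a step-2 range by one: the new endpoint is picked up iff it has the start's parity
theorem pyRange_two_succ_right_dvd (a b : Int) (h : a ≤ b) (hd : (b - a) % 2 = 0) :
    PySem.List.pyRange a (b + 1) 2 = PySem.List.pyRange a b 2 ++ [b] := by
  rw [PySem.List.pyRange_of_pos _ _ (by norm_num : (0:Int) < 2),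
      PySem.List.pyRange_of_pos _ _ (by norm_num : (0:Int) < 2),
      if_pos (by omega)]
  have hcount : ((b + 1 - a + 2 - 1) / 2).toNat
      = (if a < b then ((b - a + 2 - 1) / 2).toNat else 0) + 1 := by
    split_ifs with h' <;> omega
  rw [hcount, List.range_succ, List.map_append]
  congr 1
  simp only [List.map_cons, List.map_nil]
  congr 1
  split_ifs with h' <;> omega

theorem pyRange_two_succ_right_not_dvd (a b : Int) (hd : (b - a) % 2 ≠ 0) :
    PySem.List.pyRange a (b + 1) 2 = PySem.List.pyRange a b 2 := by
  rw [PySem.List.pyRange_of_pos _ _ (by norm_num : (0:Int) < 2),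
      PySem.List.pyRange_of_pos _ _ (by norm_num : (0:Int) < 2)]
  have hcount : (if a < b + 1 then ((b + 1 - a + 2 - 1) / 2).toNat else 0)
      = (if a < b then ((b - a + 2 - 1) / 2).toNat else 0) := by
    split_ifs with h1 h2 h2 <;> omega
  rw [hcount]

-- loop invariant: A's branching fold produces exactly B's two joined stepped ranges
theorem key (n : Nat) :
    (PySem.List.pyRange 1 ((n : Int) + 1) 1).foldl
      (fun (st : String × String) i =>
        if PySem.Int.mod i 2 == 0 then (st.1 ++ ("\n" ++ PySem.Int.toStr i), st.2)
        else (st.1, st.2 ++ ("\n" ++ PySem.Int.toStr i)))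
      ("", "")
    = (String.join ((PySem.List.pyRange 2 ((n : Int) + 1) 2).map (fun i => "\n" ++ PySem.Int.toStr i)),
       String.join ((PySem.List.pyRange 1 ((n : Int) + 1) 2).map (fun i => "\n" ++ PySem.Int.toStr i))) := by
  induction n with
  | zero =>
      simp only [Nat.cast_zero, zero_add]
      rw [PySem.List.pyRange_one_eq_nil (by norm_num),
          pyRange_pos_eq_nil 2 1 2 (by norm_num) (by norm_num),
          pyRange_pos_eq_nil 1 1 2 (by norm_num) (by norm_num)]
      simp [String.join]
  | succ m ih =>
      have hb : ((m + 1 : Nat) : Int) + 1 = ((m : Int) + 1) + 1 := by push_cast; ring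
      rw [hb, PySem.List.pyRange_one_succ_right (by omega), List.foldl_append, ih]
      simp only [List.foldl_cons, List.foldl_nil]
      by_cases hd : ((m : Int) + 1) % 2 = 0
      · have hmod : PySem.Int.mod ((m : Int) + 1) 2 = 0 := by
          simp [PySem.Int.mod, Int.fmod_eq_emod]; omega
        rw [if_pos (by simp only [beq_iff_eq]; exact hmod),
            pyRange_two_succ_right_dvd 2 ((m : Int) + 1) (by omega) (by omega),
            pyRange_two_succ_right_not_dvd 1 ((m : Int) + 1) (by omega),
            List.map_append]
        simp [join_append_singleton]
      · have hmod : ¬ PySem.Int.mod ((m : Int) + 1) 2 = 0 := by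
          simp [PySem.Int.mod, Int.fmod_eq_emod]; omega
        rw [if_neg (by simp only [beq_iff_eq]; exact hmod),
            pyRange_two_succ_right_not_dvd 2 ((m : Int) + 1) (by omega),
            pyRange_two_succ_right_dvd 1 ((m : Int) + 1) (by omega) (by omega),
            List.map_append]
        simp [join_append_singleton]

-- ===== VERDICT (by name: the statement is the Claim_ definition above) =====
theorem exercicio16_spec : Claim_equal_exercicio16 := by
  intro num1 _
  unfold Spec_exercicio16 exercicio16 exercicio16_alt
  by_cases h : 0 < num1
  · have hn : num1 = ((num1.toNat : Nat) : Int) := by omega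
    rw [hn, key]
  · rw [PySem.List.pyRange_one_eq_nil (by omega),
        pyRange_pos_eq_nil 2 (num1 + 1) 2 (by norm_num) (by omega),
        pyRange_pos_eq_nil 1 (num1 + 1) 2 (by norm_num) (by omega)]
    simp [String.join]
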